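-- pv_equiv track=rewrite | github.com/leejuhanKr/Algorithm | 프로그래머스/unrated/133501. 야간 전술보행/야간 전술보행.py | solution
-- ===== SOURCE A (Python) =====
-- def solution(distance, scope, times):
--     scope = map(sorted, scope)
--     scope,times = zip(*sorted(zip(scope,times)))
--     o = 0
--     for t in range(1,distance+1):
--         if scope[o][0] <= t <= scope[o][1]:
--             if 1 <= t%sum(times[o]) <= times[o][0]:
--                 return t
--             if t == scope[o][1]:
--                 o += 1
--                 if not (o < len(scope)):
--                     return distance
--     return distance
-- ===== SOURCE B (Python) =====
-- def _first_hit(lo, hi, m, w):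
--     """Smallest t in [lo, hi] with 1 <= t % m <= w (Python mod), or None."""
--     if m <= 0 or w <= 0:
--         return None
--     W = min(w, m - 1)
--     if W < 1:
--         return None
--     r = lo % m
--     if 1 <= r <= W:
--         t = lo
--     elif r == 0:
--         t = lo + 1
--     else:
--         t = lo + (m - r) + 1
--     return t if t <= hi else None
--
--
-- def solution(distance, scope, times):
--     pairs = sorted((sorted(s), t) for s, t in zip(scope, times))
--     start = 1
--     for s, tm in pairs:
--         lo = max(s[0], start)
--         hi = min(s[1], distance)
--         if hi < lo:
--             return distance
--         t = _first_hit(lo, hi, sum(tm), tm[0])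
--         if t is not None:
--             return t
--         if distance < s[1]:
--             return distance
--         start = s[1] + 1
--     return distance
-- ===== Notes on version B (the rewrite author's own statement) =====
-- stated objective: alternative
-- what changed: Instead of walking minute by minute over t = 1..distance with an interval pointer, B walks the sorted intervals once and computes the first caught minute inside each interval's effective window directly by modular arithmetic (_first_hit), so no per-minute scan remains.
-- outside the precondition, e.g. on solution(0, [[1]], [[1]]): A returns 0, B raises IndexError; on solution(0, [[1]], [[0]]): A returns 0, B raises IndexError; on solution(0, [[1, 2]], [[0]]): A returns 0, B returns 0
import Mathlib
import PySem

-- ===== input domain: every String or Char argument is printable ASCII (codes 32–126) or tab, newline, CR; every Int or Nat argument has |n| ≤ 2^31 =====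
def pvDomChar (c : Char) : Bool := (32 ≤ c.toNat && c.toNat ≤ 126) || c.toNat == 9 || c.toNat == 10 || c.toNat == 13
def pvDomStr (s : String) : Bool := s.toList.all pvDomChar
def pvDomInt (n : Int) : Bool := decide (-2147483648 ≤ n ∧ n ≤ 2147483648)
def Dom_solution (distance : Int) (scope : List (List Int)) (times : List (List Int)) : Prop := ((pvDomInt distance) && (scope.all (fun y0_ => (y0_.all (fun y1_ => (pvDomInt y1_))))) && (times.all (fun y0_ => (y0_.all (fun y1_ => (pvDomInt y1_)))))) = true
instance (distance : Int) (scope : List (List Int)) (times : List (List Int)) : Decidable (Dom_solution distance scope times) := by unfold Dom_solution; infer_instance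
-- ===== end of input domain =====

-- B replaces A's minute-by-minute walk over 1..distance with one modular-arithmetic
-- first-hit computation per sorted interval (a different algorithm; cost no longer scans t).

-- Shared preprocessing of both Pythons: sorted(zip(map(sorted, scope), times)).
-- Python compares the (list, list) tuples lexicographically; we encode that comparison as a
-- single List Int key with a separator -2^32 smaller than every int admitted by Dom_solution
-- (exact on Dom, where |element| ≤ 2^31).
def pyKeyPair (p : List Int × List Int) : List Int := p.1 ++ [(-4294967296 : Int)] ++ p.2

def pySortPairs (scope times : List (List Int)) : List (List Int × List Int) :=
  PySem.List.sorted ((scope.map (fun s => PySem.List.sorted s (fun x => x) false)).zip times) pyKeyPair false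

-- ===== PORT A =====
-- the 'for t in range(1, distance+1)' loop with interval pointer o; early returns are the
-- non-recursive branches.  times[o][0] is read with a default: Python short-circuits so it is
-- only meaningful when reached, and Pre_ guarantees the element exists there.
def aLoop (distance : Int) (scopeS timesS : List (List Int)) : List Int → Nat → Int
  | [], _ => distance
  | t :: ts, o =>
    let s := PySem.List.pyGetD scopeS (o : Int) []
    let tm := PySem.List.pyGetD timesS (o : Int) []
    if PySem.List.pyGetD s 0 0 ≤ t ∧ t ≤ PySem.List.pyGetD s 1 0 then
      if 1 ≤ PySem.Int.mod t tm.sum ∧ PySem.Int.mod t tm.sum ≤ PySem.List.pyGetD tm 0 0 then t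
      else if t = PySem.List.pyGetD s 1 0 then
        if ¬ ((o : Int) + 1 < (scopeS.length : Int)) then distance
        else aLoop distance scopeS timesS ts (o + 1)
      else aLoop distance scopeS timesS ts o
    else aLoop distance scopeS timesS ts o

def solution (distance : Int) (scope : List (List Int)) (times : List (List Int)) : Int :=
  let zipped := pySortPairs scope times
  let scopeS := zipped.map Prod.fst
  let timesS := zipped.map Prod.snd
  aLoop distance scopeS timesS (PySem.List.pyRange 1 (distance + 1) 1) 0

-- ===== PORT B =====
-- _first_hit(lo, hi, m, w): smallest t in [lo, hi] with 1 <= t % m <= w, closed form.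
def firstHit (lo hi m w : Int) : Option Int :=
  if m ≤ 0 ∨ w ≤ 0 then none
  else
    let W := min w (m - 1)
    if W < 1 then none
    else
      let r := PySem.Int.mod lo m
      let t := if 1 ≤ r ∧ r ≤ W then lo else if r = 0 then lo + 1 else lo + (m - r) + 1
      if t ≤ hi then some t else none

def bLoop (distance : Int) : List (List Int × List Int) → Int → Int
  | [], _ => distance
  | (s, tm) :: rest, start =>
    let lo := max (PySem.List.pyGetD s 0 0) start
    let hi := min (PySem.List.pyGetD s 1 0) distance
    if hi < lo then distance
    else
      match firstHit lo hi tm.sum (PySem.List.pyGetD tm 0 0) with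
      | some t => t
      | none =>
        if distance < PySem.List.pyGetD s 1 0 then distance
        else bLoop distance rest (PySem.List.pyGetD s 1 0 + 1)

def solution_alt (distance : Int) (scope : List (List Int)) (times : List (List Int)) : Int :=
  bLoop distance (pySortPairs scope times) 1

-- ===== PRECONDITION & SPEC =====
-- Pre_ excludes the inputs where A raises (empty scope/times: ValueError unpacking zip(*...);
-- a reached scope entry shorter than 2: IndexError; a reached times entry summing to 0:
-- ZeroDivisionError).  'Reached' is not closed-form, so the last two are required of every
-- zipped pair; this also excludes some inputs on which A returns because the bad entry is
-- never reached before t passes distance (see cites).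
def Pre_solution (distance : Int) (scope : List (List Int)) (times : List (List Int)) : Prop :=
  scope ≠ [] ∧ times ≠ [] ∧ ∀ p ∈ scope.zip times, 2 ≤ p.1.length ∧ p.2.sum ≠ 0
instance (distance : Int) (scope : List (List Int)) (times : List (List Int)) : Decidable (Pre_solution distance scope times) := by unfold Pre_solution; infer_instance

def pvWitness_solution : Int × List (List Int) × List (List Int) := (10, [[3, 1], [5, 9]], [[2, 1], [1, 3]])

def Spec_solution (distance : Int) (scope : List (List Int)) (times : List (List Int)) (out : Int) : Prop := out = solution_alt distance scope times
instance (distance : Int) (scope : List (List Int)) (times : List (List Int)) (out : Int) : Decidable (Spec_solution distance scope times out) := by unfold Spec_solution; infer_instance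

-- ===== CLAIM (what is proved, stated in full; the proofs are below) =====
def Claim_equal_solution : Prop := ∀ (distance : Int) (scope : List (List Int)) (times : List (List Int)), Dom_solution distance scope times → Pre_solution distance scope times → Spec_solution distance scope times (solution distance scope times)

-- ===== LEMMAS AND PROOFS =====

-- the per-pair facts the equivalence needs: scope entry sorted low-to-high, period sum nonzero
def GoodPair (p : List Int × List Int) : Prop :=
  PySem.List.pyGetD p.1 0 0 ≤ PySem.List.pyGetD p.1 1 0 ∧ p.2.sum ≠ 0

theorem pyRange_one_nil {a b : Int} (h : b ≤ a) : PySem.List.pyRange a b 1 = [] := by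
  simp [PySem.List.pyRange]; omega

theorem pyGetD_nil_eq {i : Int} {d : Int} : PySem.List.pyGetD ([] : List Int) i d = d := by
  simp [PySem.List.pyGetD, PySem.List.pyGet?, PySem.List.pyIdx?]

-- once t has passed the current interval's right end, A never advances o again
theorem aLoop_stuck (distance : Int) (scopeS timesS : List (List Int)) (o : Nat) :
    ∀ l : List Int, (∀ x ∈ l, PySem.List.pyGetD (PySem.List.pyGetD scopeS (o : Int) []) 1 0 < x) →
      aLoop distance scopeS timesS l o = distance := by
  intro l
  induction l with
  | nil => intro _; rfl
  | cons t ts ih =>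
    intro h
    have ht := h t (List.mem_cons_self)
    rw [aLoop]
    rw [if_neg (by intro hc; omega)]
    exact ih (fun x hx => h x (List.mem_cons_of_mem _ hx))

theorem mod_pos_of_ge_one {lo m : Int} (hm : m ≠ 0) (h1 : 1 ≤ PySem.Int.mod lo m) : 0 < m := by
  rcases lt_trichotomy m 0 with h | h | h
  · have := PySem.Int.mod_neg_bounds lo h; omega
  · exact absurd h hm
  · exact h

theorem firstHit_none_of_lt {lo hi m w : Int} (h : hi < lo) : firstHit lo hi m w = none := by
  unfold firstHit
  by_cases hneg : m ≤ 0 ∨ w ≤ 0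
  · simp [hneg]
  · have hm : 0 < m := by omega
    have h1 := PySem.Int.mod_nonneg lo hm
    have h2 := PySem.Int.mod_lt lo hm
    simp only [hneg, if_false]
    split_ifs <;> first | rfl | (exfalso; omega)

theorem firstHit_some_self {lo hi m w : Int} (hm0 : m ≠ 0) (hle : lo ≤ hi)
    (h1 : 1 ≤ PySem.Int.mod lo m) (h2 : PySem.Int.mod lo m ≤ w) :
    firstHit lo hi m w = some lo := by
  have hm : 0 < m := mod_pos_of_ge_one hm0 h1
  have hlt := PySem.Int.mod_lt lo hm
  simp only [firstHit]
  split_ifs <;> first | rfl | (exfalso; omega)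

theorem firstHit_none_self {lo m w : Int} (_hm : m ≠ 0)
    (h : ¬(1 ≤ PySem.Int.mod lo m ∧ PySem.Int.mod lo m ≤ w)) :
    firstHit lo lo m w = none := by
  unfold firstHit
  by_cases hneg : m ≤ 0 ∨ w ≤ 0
  · simp [hneg]
  · have hm' : 0 < m := by omega
    have h1 := PySem.Int.mod_nonneg lo hm'
    have h2 := PySem.Int.mod_lt lo hm'
    simp only [hneg, if_false]
    split_ifs <;> first | rfl | (exfalso; omega)

theorem firstHit_succ {lo hi m w : Int} (hm : m ≠ 0)
    (h : ¬(1 ≤ PySem.Int.mod lo m ∧ PySem.Int.mod lo m ≤ w)) :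
    firstHit lo hi m w = firstHit (lo + 1) hi m w := by
  by_cases hneg : m ≤ 0 ∨ w ≤ 0
  · unfold firstHit; simp [hneg]
  · by_cases hW : min w (m - 1) < 1
    · unfold firstHit; simp only [hneg, if_false]; rw [if_pos hW, if_pos hW]
    · have hm2 : 2 ≤ m := by omega
      have hm' : (0:Int) < m := by omega
      have h0 := PySem.Int.mod_nonneg lo hm'
      have hlt := PySem.Int.mod_lt lo hm'
      have hsucc : PySem.Int.mod (lo + 1) m =
          if PySem.Int.mod lo m = m - 1 then 0 else PySem.Int.mod lo m + 1 := by
        rw [PySem.Int.mod_eq_emod_of_pos hm', PySem.Int.mod_eq_emod_of_pos hm']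
        have e : (lo + 1) % m = (lo % m + 1) % m := by
          conv_lhs => rw [Int.add_emod]
          rw [show (1:Int) % m = 1 from Int.emod_eq_of_lt (by omega) (by omega)]
        have hb0 := Int.emod_nonneg lo (by omega : m ≠ 0)
        have hbl := Int.emod_lt_of_pos lo hm'
        rw [e]
        split_ifs with he
        · rw [he, show m - 1 + 1 = m from by ring, Int.emod_self]
        · exact Int.emod_eq_of_lt (by omega) (by omega)
      by_cases he : PySem.Int.mod lo m = m - 1
      · rw [if_pos he] at hsucc
        have hnn := PySem.Int.mod_nonneg (lo + 1) hm'
        unfold firstHit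
        simp only [hneg, if_false]
        split_ifs <;> first | rfl | (exfalso; omega) | (congr 1; omega)
      · rw [if_neg he] at hsucc
        unfold firstHit
        simp only [hneg, if_false]
        split_ifs <;> first | rfl | (exfalso; omega) | (congr 1; omega)

-- A's scan of the current interval, characterised by firstHit
theorem aLoop_scan (distance : Int) (scopeS timesS : List (List Int)) (o : Nat)
    (hab : PySem.List.pyGetD (PySem.List.pyGetD scopeS (o : Int) []) 0 0 ≤
           PySem.List.pyGetD (PySem.List.pyGetD scopeS (o : Int) []) 1 0)
    (hm0 : (PySem.List.pyGetD timesS (o : Int) []).sum ≠ 0) :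
    ∀ (n : Nat) (t : Int), n = (distance + 1 - t).toNat →
      t ≤ PySem.List.pyGetD (PySem.List.pyGetD scopeS (o : Int) []) 1 0 →
      aLoop distance scopeS timesS (PySem.List.pyRange t (distance + 1) 1) o =
        match firstHit (max (PySem.List.pyGetD (PySem.List.pyGetD scopeS (o : Int) []) 0 0) t)
                (min (PySem.List.pyGetD (PySem.List.pyGetD scopeS (o : Int) []) 1 0) distance)
                (PySem.List.pyGetD timesS (o : Int) []).sum
                (PySem.List.pyGetD (PySem.List.pyGetD timesS (o : Int) []) 0 0) with
        | some u => u
        | none =>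
          if distance < PySem.List.pyGetD (PySem.List.pyGetD scopeS (o : Int) []) 1 0 then distance
          else if ((o : Int) + 1 < (scopeS.length : Int)) then
            aLoop distance scopeS timesS
              (PySem.List.pyRange (PySem.List.pyGetD (PySem.List.pyGetD scopeS (o : Int) []) 1 0 + 1) (distance + 1) 1)
              (o + 1)
          else distance := by
  set a := PySem.List.pyGetD (PySem.List.pyGetD scopeS (o : Int) []) 0 0 with ha
  set b := PySem.List.pyGetD (PySem.List.pyGetD scopeS (o : Int) []) 1 0 with hb
  set m := (PySem.List.pyGetD timesS (o : Int) []).sum with hmm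
  set w := PySem.List.pyGetD (PySem.List.pyGetD timesS (o : Int) []) 0 0 with hw
  intro n
  induction n with
  | zero =>
    intro t hn htb
    have htd : distance < t := by omega
    rw [pyRange_one_nil (by omega), aLoop]
    rw [firstHit_none_of_lt (by omega : min b distance < max a t)]
    rw [if_pos (by omega : distance < b)]
  | succ k ih =>
    intro t hn htb
    have htd : t ≤ distance := by omega
    rw [PySem.List.pyRange_one_cons (by omega), aLoop]
    by_cases hin : a ≤ t ∧ t ≤ b
    · rw [if_pos hin]
      have hmax : max a t = t := by omega
      by_cases hhit : 1 ≤ PySem.Int.mod t m ∧ PySem.Int.mod t m ≤ w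
      · rw [if_pos hhit, hmax, firstHit_some_self hm0 (by omega) hhit.1 hhit.2]
      · rw [if_neg hhit]
        by_cases hend : t = b
        · rw [if_pos hend]
          rw [hmax, (by omega : min b distance = b), hend, firstHit_none_self hm0 (hend ▸ hhit)]
          rw [if_neg (by omega : ¬ distance < b)]
          by_cases hlen : ((o : Int) + 1 < (scopeS.length : Int))
          · rw [if_neg (by omega), if_pos hlen]
          · rw [if_pos (by omega), if_neg hlen]
        · rw [if_neg hend]
          rw [ih (t + 1) (by omega) (by omega)]
          rw [hmax, firstHit_succ hm0 hhit, (by omega : max a (t + 1) = t + 1)]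
    · rw [if_neg hin]
      have hta : t < a := by omega
      rw [ih (t + 1) (by omega) (by omega)]
      rw [(by omega : max a t = a), (by omega : max a (t + 1) = a)]

theorem getD_map_of_drop {γ α β : Type} (P : List (α × β)) (o : Nat) (p : α × β)
    (rest : List (α × β)) (h : P.drop o = p :: rest) (f : α × β → γ) (d : γ) :
    (P.map f).getD o d = f p := by
  have hPo : P[o]? = some p := by
    have h0 : (P.drop o)[0]? = P[o + 0]? := List.getElem?_drop
    rw [h] at h0
    simpa using h0.symm
  rw [List.getD_eq_getElem?_getD, List.getElem?_map, hPo]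
  rfl

-- A's indexed loop over the sorted pairs equals B's structural loop on the suffix
theorem loop_eq (distance : Int) (P : List (List Int × List Int))
    (hgood : ∀ p ∈ P, GoodPair p) :
    ∀ (ps : List (List Int × List Int)) (o : Nat) (start : Int), P.drop o = ps → 1 ≤ start →
      aLoop distance (P.map Prod.fst) (P.map Prod.snd) (PySem.List.pyRange start (distance + 1) 1) o =
      bLoop distance ps start := by
  intro ps
  induction ps with
  | nil =>
    intro o start hdrop hstart
    rw [bLoop]
    have ho : P.length ≤ o := by
      by_contra hc
      have := List.drop_eq_nil_iff.mp hdrop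
      omega
    have hs : PySem.List.pyGetD (P.map Prod.fst) (o : Int) [] = [] := by
      rw [PySem.List.pyGetD_natCast, List.getD_eq_default]
      simpa using ho
    apply aLoop_stuck
    intro x hx
    rw [hs, pyGetD_nil_eq]
    have := PySem.List.mem_pyRange_one.mp hx
    omega
  | cons p rest ih =>
    intro o start hdrop hstart
    obtain ⟨s, tm⟩ := p
    have hmem : (s, tm) ∈ P := by
      have : (s, tm) ∈ P.drop o := by rw [hdrop]; exact List.mem_cons_self
      exact List.mem_of_mem_drop this
    obtain ⟨hab, hm0⟩ := hgood _ hmem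
    have hsS : PySem.List.pyGetD (P.map Prod.fst) (o : Int) [] = s := by
      rw [PySem.List.pyGetD_natCast]; exact getD_map_of_drop P o _ rest hdrop Prod.fst []
    have htS : PySem.List.pyGetD (P.map Prod.snd) (o : Int) [] = tm := by
      rw [PySem.List.pyGetD_natCast]; exact getD_map_of_drop P o _ rest hdrop Prod.snd []
    rw [bLoop]
    set a := PySem.List.pyGetD s 0 0 with ha
    set b := PySem.List.pyGetD s 1 0 with hb
    by_cases hlohi : min b distance < max a start
    · rw [if_pos hlohi]
      by_cases hbs : b < start
      · apply aLoop_stuck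
        intro x hx
        rw [hsS, ← hb]
        have := PySem.List.mem_pyRange_one.mp hx
        omega
      · -- start ≤ b : the scan sees an empty effective window and runs off the end
        rw [aLoop_scan distance _ _ o (by rw [hsS]; exact hab) (by rw [htS]; exact hm0)
            ((distance + 1 - start).toNat) start rfl (by rw [hsS]; omega)]
        rw [hsS, htS]
        rw [firstHit_none_of_lt (by omega)]
        rw [if_pos (by omega)]
    · rw [if_neg hlohi]
      have hsb : start ≤ b := by omega
      rw [aLoop_scan distance _ _ o (by rw [hsS]; exact hab) (by rw [htS]; exact hm0)
          ((distance + 1 - start).toNat) start rfl (by rw [hsS]; omega)]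
      rw [hsS, htS]
      cases hfh : firstHit (max a start) (min b distance) tm.sum (PySem.List.pyGetD tm 0 0) with
      | some u => rfl
      | none =>
        by_cases hdb : distance < b
        · rw [if_pos hdb, if_pos hdb]
        · rw [if_neg hdb, if_neg hdb]
          have hdrop' : P.drop (o + 1) = rest := by
            rw [← List.tail_drop, hdrop, List.tail_cons]
          cases rest with
          | nil =>
            have hlen : P.length ≤ o + 1 := by
              by_contra hc
              have := List.drop_eq_nil_iff.mp hdrop'
              omega
            rw [if_neg (by simp only [List.length_map]; omega)]
            rw [bLoop]
          | cons q qs =>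
            have hlen : o + 1 < P.length := by
              by_contra hc
              rw [List.drop_eq_nil_of_le (by omega)] at hdrop'
              simp at hdrop'
            rw [if_pos (by simp only [List.length_map]; exact_mod_cast hlen)]
            exact ih (o + 1) (b + 1) hdrop' (by omega)

theorem goodPairs_of_pre (scope times : List (List Int))
    (hpre : ∀ p ∈ scope.zip times, 2 ≤ p.1.length ∧ p.2.sum ≠ 0) :
    ∀ p ∈ pySortPairs scope times, GoodPair p := by
  intro p hp
  rw [pySortPairs, PySem.List.mem_sorted] at hp
  rw [List.zip_map_left, List.mem_map] at hp
  obtain ⟨q, hq, hpq⟩ := hp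
  obtain ⟨q1, q2⟩ := q
  obtain ⟨hlen, hsum⟩ := hpre _ hq
  simp only at hlen hsum
  subst hpq
  constructor
  · have hpw := PySem.List.sorted_pairwise q1 (fun x => x)
    have hl : (PySem.List.sorted q1 (fun x => x) false).length = q1.length :=
      PySem.List.length_sorted _ _ _
    simp only [Prod.map, id]
    cases hsrt : PySem.List.sorted q1 (fun x => x) false with
    | nil => rw [hsrt] at hl; simp at hl; omega
    | cons x ys =>
      cases ys with
      | nil => rw [hsrt] at hl; simp at hl; omega
      | cons y zs =>
        rw [hsrt] at hpw
        have hxy : x ≤ y := (List.pairwise_cons.mp hpw).1 y List.mem_cons_self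
        have e0 : PySem.List.pyGetD (x :: y :: zs) 0 0 = x := PySem.List.pyGetD_zero_cons _ _ _
        have e1 : PySem.List.pyGetD (x :: y :: zs) 1 0 = y := by
          have : ((1:Nat) : Int) = (1 : Int) := rfl
          rw [← this, PySem.List.pyGetD_natCast]
          rfl
        rw [e0, e1]
        exact hxy
  · simpa using hsum

-- ===== VERDICT (by name: the statement is the Claim_ definition above) =====
theorem solution_spec : Claim_equal_solution := by
  intro distance scope times _ hpre
  unfold Spec_solution solution solution_alt
  exact loop_eq distance (pySortPairs scope times)
    (goodPairs_of_pre scope times hpre.2.2) (pySortPairs scope times) 0 1 rfl le_rfl
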